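-- pv_equiv track=rewrite | github.com/vojtob/ify | src/utils/rec.py | __group_similar
-- ===== SOURCE A (Python) =====
-- ALIGNGAP = 7
--
-- def __group_similar(values, epsilon=ALIGNGAP):
--     snapped = []
--     for val in sorted(values):
--         for snap_val in snapped:
--             if abs(val - snap_val) <= epsilon:
--                 val = snap_val  # zarovnaj na existujúcu hodnotu
--                 break
--         else:
--             snapped.append(val)  # nová skupina
--     return snapped
-- ===== SOURCE B (Python) =====
-- ALIGNGAP = 7
--
-- def __group_similar(values, epsilon=ALIGNGAP):
--     # Two-pointer run-skipping over the sorted values: take a value as a new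
--     # representative, then skip the whole run of following values within
--     # epsilon of it.  Correct because representatives are increasing and
--     # spaced more than epsilon apart, so only the current run can snap.
--     vs = sorted(values)
--     snapped = []
--     i = 0
--     n = len(vs)
--     while i < n:
--         rep = vs[i]
--         snapped.append(rep)
--         i += 1
--         while i < n and vs[i] - rep <= epsilon:
--             i += 1
--     return snapped
-- ===== Notes on version B (the rewrite author's own statement) =====
-- stated objective: faster
-- what changed: B replaces A's inner scan over all existing representatives by a two-pointer run-skip over the sorted values: each new representative consumes the whole following run within epsilon, so every value is touched once after sorting.
import Mathlib
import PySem

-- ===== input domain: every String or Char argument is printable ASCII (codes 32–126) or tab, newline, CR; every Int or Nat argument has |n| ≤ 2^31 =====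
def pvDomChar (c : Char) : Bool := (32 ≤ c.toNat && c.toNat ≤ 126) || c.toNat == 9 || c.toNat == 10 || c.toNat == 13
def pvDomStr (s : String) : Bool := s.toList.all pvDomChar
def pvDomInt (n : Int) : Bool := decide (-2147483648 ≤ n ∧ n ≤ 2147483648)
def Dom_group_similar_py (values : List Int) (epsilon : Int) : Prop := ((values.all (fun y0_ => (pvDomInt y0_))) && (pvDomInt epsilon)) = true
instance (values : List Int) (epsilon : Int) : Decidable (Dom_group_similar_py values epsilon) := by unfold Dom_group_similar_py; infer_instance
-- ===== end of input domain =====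

-- B replaces A's inner scan over all snapped representatives by a two-pointer
-- run-skip over the sorted values (objective: faster, asymptotic).


-- ===== PORT A =====
-- inner 'for snap_val in snapped: … break / else: append' loop: only its
-- break-vs-else outcome affects the returned list ('val = snap_val' is not
-- observable in the result), so it is ported as the scan 'any'.
def aStep (epsilon : Int) (snapped : List Int) (val : Int) : List Int :=
  if snapped.any (fun snap_val => decide (|val - snap_val| ≤ epsilon)) then snapped
  else snapped ++ [val]

def group_similar_py (values : List Int) (epsilon : Int) : List Int :=
  (PySem.List.sorted values (fun x => x) false).foldl (aStep epsilon) []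

-- ===== PORT B =====
-- Source B's inner 'while i < n and vs[i] - rep <= epsilon: i += 1' = dropping the
-- run of values within epsilon of the representative
def bSkip (epsilon rep : Int) (xs : List Int) : List Int :=
  xs.dropWhile (fun x => decide (x - rep ≤ epsilon))

-- Source B's outer while loop over the sorted list: take a representative, skip its run
def bGroups (epsilon : Int) : List Int → List Int
  | [] => []
  | rep :: rest => rep :: bGroups epsilon (bSkip epsilon rep rest)
termination_by xs => xs.length
decreasing_by
  exact Nat.lt_succ_of_le (List.Sublist.length_le (by simpa [bSkip] using List.dropWhile_sublist (l := rest) (p := fun x => decide (x - rep ≤ epsilon))))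

def group_similar_py_alt (values : List Int) (epsilon : Int) : List Int :=
  bGroups epsilon (PySem.List.sorted values (fun x => x) false)

-- ===== PRECONDITION & SPEC =====
def Spec_group_similar_py (values : List Int) (epsilon : Int) (out : List Int) : Prop := out = group_similar_py_alt values epsilon
instance (values : List Int) (epsilon : Int) (out : List Int) : Decidable (Spec_group_similar_py values epsilon out) := by unfold Spec_group_similar_py; infer_instance

-- ===== CLAIM (what is proved, stated in full; the proofs are below) =====
def Claim_equal_group_similar_py : Prop := ∀ (values : List Int) (epsilon : Int), Dom_group_similar_py values epsilon → Spec_group_similar_py values epsilon (group_similar_py values epsilon)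

-- ===== LEMMAS AND PROOFS =====

-- proof-only intermediate: A's step with the scan replaced by a comparison with
-- the last representative (valid on sorted input, lemma any_eq_last below)
def bStep (epsilon : Int) (snapped : List Int) (val : Int) : List Int :=
  match snapped.getLast? with
  | none => snapped ++ [val]
  | some l => if epsilon < val - l then snapped ++ [val] else snapped

-- On a ≤-sorted accumulator all of whose members are ≤ val, the scan for a
-- representative within epsilon succeeds iff the LAST representative is within epsilon.
theorem any_eq_last (epsilon val : Int) :
    ∀ (snapped : List Int), snapped.Pairwise (· ≤ ·) → (∀ s ∈ snapped, s ≤ val) →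
    snapped.any (fun snap_val => decide (|val - snap_val| ≤ epsilon)) =
      (match snapped.getLast? with
       | none => false
       | some l => decide (val - l ≤ epsilon)) := by
  intro snapped
  induction snapped with
  | nil => intro _ _; rfl
  | cons a l ih =>
    intro hp hle
    have hal : ∀ s ∈ l, a ≤ s := fun s hs => (List.pairwise_cons.mp hp).1 s hs
    have hl : l.Pairwise (· ≤ ·) := (List.pairwise_cons.mp hp).2
    have hlev : ∀ s ∈ l, s ≤ val := fun s hs => hle s (List.mem_cons_of_mem a hs)
    have hav : a ≤ val := hle a (List.mem_cons_self ..)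
    cases l with
    | nil =>
      simp only [List.any_cons, List.any_nil, List.getLast?_singleton, Bool.or_false]
      have : |val - a| = val - a := abs_of_nonneg (by omega)
      rw [this]
    | cons b t =>
      have hlast : (a :: b :: t).getLast? = (b :: t).getLast? := rfl
      rw [List.any_cons, hlast, ih hl hlev]
      obtain ⟨x, hx⟩ : ∃ x, (b :: t).getLast? = some x := ⟨_, List.getLast?_eq_some_getLast (by simp)⟩
      have hxmem : x ∈ b :: t := List.mem_of_getLast? hx
      have hax : a ≤ x := hal x hxmem
      rw [hx]
      simp only []
      by_cases h : |val - a| ≤ epsilon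
      · have : val - x ≤ epsilon := by
          have : |val - a| = val - a := abs_of_nonneg (by omega)
          omega
        simp [h, this]
      · simp [h]

theorem fold_eq (epsilon : Int) :
    ∀ (rest snapped : List Int), (snapped ++ rest).Pairwise (· ≤ ·) →
    rest.foldl (aStep epsilon) snapped = rest.foldl (bStep epsilon) snapped := by
  intro rest
  induction rest with
  | nil => intro _ _; rfl
  | cons v rest ih =>
    intro snapped hp
    have hps : snapped.Pairwise (· ≤ ·) := hp.sublist (List.sublist_append_left _ _)
    have hlev : ∀ s ∈ snapped, s ≤ v := by
      have := List.pairwise_append.mp hp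
      exact fun s hs => this.2.2 s hs v (List.mem_cons_self ..)
    have hstep : aStep epsilon snapped v = bStep epsilon snapped v := by
      unfold aStep bStep
      rw [any_eq_last epsilon v snapped hps hlev]
      cases h : snapped.getLast? with
      | none => simp
      | some l =>
        by_cases hc : epsilon < v - l
        · simp [hc, show ¬(v - l ≤ epsilon) by omega]
        · simp [hc, show v - l ≤ epsilon by omega]
    have hnext : (aStep epsilon snapped v ++ rest).Pairwise (· ≤ ·) := by
      unfold aStep
      split
      · exact hp.sublist (List.Sublist.append_left (List.sublist_cons_self v rest) snapped)
      · have : snapped ++ [v] ++ rest = snapped ++ v :: rest := by simp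
        rw [this]; exact hp
    simp only [List.foldl_cons]
    rw [ih (aStep epsilon snapped v) hnext, hstep]

-- the last-representative fold equals B's run-skipping recursion
theorem foldB_go (epsilon : Int) :
    ∀ (xs snapped : List Int) (x : Int),
    xs.foldl (bStep epsilon) (snapped ++ [x]) = snapped ++ [x] ++ bGroups epsilon (bSkip epsilon x xs) := by
  intro xs
  induction xs with
  | nil => intro snapped x; simp [bGroups, bSkip]
  | cons y rest ih =>
    intro snapped x
    have hlast : (snapped ++ [x]).getLast? = some x := by simp
    by_cases h : y - x ≤ epsilon
    · have hstep : bStep epsilon (snapped ++ [x]) y = snapped ++ [x] := by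
        simp [bStep, hlast, show ¬ epsilon < y - x by omega]
      have hskip : bSkip epsilon x (y :: rest) = bSkip epsilon x rest := by
        simp [bSkip, List.dropWhile, h]
      rw [List.foldl_cons, hstep, hskip, ih]
    · have hstep : bStep epsilon (snapped ++ [x]) y = (snapped ++ [x]) ++ [y] := by
        simp [bStep, hlast, show epsilon < y - x by omega]
      have hskip : bSkip epsilon x (y :: rest) = y :: rest := by
        simp [bSkip, List.dropWhile, h]
      rw [List.foldl_cons, hstep, hskip, ih (snapped ++ [x]) y]
      simp [bGroups, bSkip]

theorem foldB_eq_bGroups (epsilon : Int) (xs : List Int) :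
    xs.foldl (bStep epsilon) [] = bGroups epsilon xs := by
  cases xs with
  | nil => simp [bGroups]
  | cons v rest =>
    have h0 : bStep epsilon [] v = [v] := by simp [bStep]
    rw [List.foldl_cons, h0]
    have := foldB_go epsilon rest [] v
    simpa [bGroups] using this

-- ===== VERDICT (by name: the statement is the Claim_ definition above) =====
theorem group_similar_py_spec : Claim_equal_group_similar_py := by
  intro values epsilon _
  unfold Spec_group_similar_py group_similar_py group_similar_py_alt
  rw [fold_eq epsilon _ [] (by simpa using PySem.List.sorted_pairwise values (fun x => x))]
  exact foldB_eq_bGroups epsilon _
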